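-- pv_equiv track=rewrite | github.com/WordPress/sqlite-database-integration | custom-parser/grammar-factoring/ebnfutils.py | expand_branch
-- ===== SOURCE A (Python) =====
-- from collections import defaultdict
--
-- def expand_branch(grammar_hash, branch_id):
--     paths = defaultdict(list)
--
--     def recursive_fn(branch_id, trace):
--         is_terminal = isinstance(branch_id, str) and branch_id not in grammar_hash
--         if is_terminal:
--             token = branch_id
--             paths[token].append(trace)
--             return
--
--         for i, branch in enumerate(grammar_hash[branch_id]):
--             recursive_fn(
--                 branch[0],
--                 trace + [f"{branch_id}[{i}]"]
--             )
--
--     recursive_fn(branch_id, [])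
--     return dict(paths)
-- ===== SOURCE B (Python) =====
-- def expand_branch(grammar_hash, branch_id):
--     # Pure bottom-up enumeration: each node yields its (token, path-suffix)
--     # pairs built back-to-front; grouping is done by collecting the distinct
--     # tokens in first-appearance order and filtering the pair list per token.
--     def leaves(bid):
--         if bid not in grammar_hash:
--             return [(bid, [])]
--         out = []
--         i = 0
--         for branch in grammar_hash[bid]:
--             label = "%s[%d]" % (bid, i)
--             for token, tail in leaves(branch[0]):
--                 out.append((token, [label] + tail))
--             i += 1
--         return out
--
--     pairs = leaves(branch_id)
--     tokens = []
--     for token, _ in pairs: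
--         if token not in tokens:
--             tokens.append(token)
--     return {tok: [trace for t, trace in pairs if t == tok] for tok in tokens}
-- ===== Notes on version B (the rewrite author's own statement) =====
-- stated objective: alternative
-- what changed: A threads the growing prefix trace down a recursion that mutates a shared defaultdict at each leaf; B is a pure bottom-up recursion returning each subtree's (token, path-suffix) pairs built back-to-front, then groups them without any dict mutation: it collects the distinct tokens in first-appearance order and filters the pair list per token.
import Mathlib
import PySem

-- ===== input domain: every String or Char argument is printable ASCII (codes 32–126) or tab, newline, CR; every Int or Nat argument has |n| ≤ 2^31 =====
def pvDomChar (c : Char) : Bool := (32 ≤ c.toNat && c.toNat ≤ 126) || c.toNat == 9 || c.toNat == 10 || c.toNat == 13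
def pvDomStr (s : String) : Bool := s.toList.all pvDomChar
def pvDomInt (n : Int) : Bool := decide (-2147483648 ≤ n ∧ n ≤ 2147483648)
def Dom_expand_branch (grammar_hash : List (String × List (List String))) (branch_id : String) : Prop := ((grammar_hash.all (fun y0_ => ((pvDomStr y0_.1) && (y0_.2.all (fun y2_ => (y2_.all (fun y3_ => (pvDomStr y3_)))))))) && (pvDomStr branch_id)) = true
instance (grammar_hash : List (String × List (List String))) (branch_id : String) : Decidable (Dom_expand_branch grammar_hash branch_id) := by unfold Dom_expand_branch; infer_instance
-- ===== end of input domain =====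

-- B replaces A's prefix-threading recursion that mutates a shared defaultdict with a
-- pure bottom-up enumeration of (token, path-suffix) pairs, grouped afterwards by
-- dedup-then-filter instead of any dict (objective: alternative decomposition).

-- ===== PORT A =====
-- f"{branch_id}[{i}]"
def pvLabel (bid : String) (i : Int) : String := bid ++ "[" ++ PySem.Int.toStr i ++ "]"

-- recursive_fn. The port runs on fuel grammar_hash.length + 1: under
-- Pre_expand_branch there is no reachable cycle, so the keys on any recursion
-- path are distinct and the depth never exceeds the number of keys + 1 — the
-- fuel is never exhausted on admitted inputs. branch[0] is ported as
-- (pyGet? branch 0).getD "": exact whenever branch ≠ [], which Pre_expand_branch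
-- guarantees for every reachable branch (Python raises IndexError there, and
-- those inputs are excluded).
def pvRecA (g : List (String × List (List String))) :
    Nat → String → List String →
    PySem.Dict String (List (List String)) → PySem.Dict String (List (List String))
  | 0, _, _, paths => paths
  | fuel+1, bid, trace, paths =>
    match (PySem.Dict.mk g).get? bid with
    | none => paths.modify bid [] (· ++ [trace])          -- paths[token].append(trace)
    | some branches =>
      (PySem.List.enumerate branches 0).foldl
        (fun p ib =>
          pvRecA g fuel ((PySem.List.pyGet? ib.2 0).getD "") (trace ++ [pvLabel bid ib.1]) p)
        paths

def expand_branch (grammar_hash : List (String × List (List String))) (branch_id : String) :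
    List (String × List (List String)) :=
  (pvRecA grammar_hash (grammar_hash.length + 1) branch_id [] PySem.Dict.empty).items

-- ===== PORT B =====
-- the inner 'for branch in grammar_hash[bid]' loop with its running counter i:
-- appends, for each branch in turn, the child's pairs with the label prepended.
-- lv stands for the recursive call at the smaller fuel. Same fuel convention
-- (and the same branch[0] port) as port A.
def pvGoB (lv : String → List (String × List String)) (bid : String) :
    Int → List (List String) → List (String × List String)
  | _, [] => []
  | i, br :: rest =>
    (lv ((PySem.List.pyGet? br 0).getD "")).map
        (fun tt => (tt.1, pvLabel bid i :: tt.2))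
      ++ pvGoB lv bid (i + 1) rest

-- leaves(bid): the (token, suffix) pairs of the subtree rooted at bid.
def pvLeavesB (g : List (String × List (List String))) :
    Nat → String → List (String × List String)
  | 0, _ => []
  | fuel+1, bid =>
    match (PySem.Dict.mk g).get? bid with
    | none => [(bid, [])]
    | some branches => pvGoB (pvLeavesB g fuel) bid 0 branches

-- the token-collecting loop: distinct tokens in first-appearance order.
def pvTokensB : List String → List (String × List String) → List String
  | acc, [] => acc
  | acc, tt :: rest => pvTokensB (if acc.contains tt.1 then acc else acc ++ [tt.1]) rest

def expand_branch_alt (grammar_hash : List (String × List (List String))) (branch_id : String) :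
    List (String × List (List String)) :=
  let pairs := pvLeavesB grammar_hash (grammar_hash.length + 1) branch_id
  (pvTokensB [] pairs).map
    (fun tok => (tok, (pairs.filter (fun tt => tt.1 == tok)).map (·.2)))

-- ===== PRECONDITION & SPEC =====
-- Graph view of the grammar: a key steps to the keys among the first symbols of
-- its branches (exactly the edges recursive_fn follows between nonterminals).
def pvIsKey (g : List (String × List (List String))) (s : String) : Bool :=
  ((PySem.Dict.mk g).get? s).isSome

def pvSuccKeys (g : List (String × List (List String))) (k : String) : List String :=
  PySem.Set.ofList (((((PySem.Dict.mk g).get? k).getD []).filterMap List.head?).filter (pvIsKey g))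

def pvClosure (g : List (String × List (List String))) (S : List String) : List String :=
  (List.range (g.length + 1)).foldl
    (fun S _ => PySem.Set.update S (S.flatMap (pvSuccKeys g))) S

def pvReachK (g : List (String × List (List String))) (bid : String) : List String :=
  pvClosure g (if pvIsKey g bid then [bid] else [])

-- Pre_ excludes exactly the inputs on which the Python A raises: a reachable key
-- with an empty branch (IndexError on branch[0]), or a cycle among the reachable
-- keys (the recursion never returns: RecursionError).
def Pre_expand_branch (grammar_hash : List (String × List (List String))) (branch_id : String) : Prop :=
  (∀ k ∈ pvReachK grammar_hash branch_id,
     ∀ br ∈ ((PySem.Dict.mk grammar_hash).get? k).getD [], br ≠ []) ∧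
  (∀ k ∈ pvReachK grammar_hash branch_id,
     k ∉ pvClosure grammar_hash (pvSuccKeys grammar_hash k))

instance (grammar_hash : List (String × List (List String))) (branch_id : String) : Decidable (Pre_expand_branch grammar_hash branch_id) := by unfold Pre_expand_branch; infer_instance

def pvWitness_expand_branch : (List (String × List (List String))) × String :=
  ([("a", [["b", "a"], ["c"]]), ("b", [["x"]])], "a")

def Spec_expand_branch (grammar_hash : List (String × List (List String))) (branch_id : String) (out : List (String × List (List String))) : Prop := out = expand_branch_alt grammar_hash branch_id
instance (grammar_hash : List (String × List (List String))) (branch_id : String) (out : List (String × List (List String))) : Decidable (Spec_expand_branch grammar_hash branch_id out) := by unfold Spec_expand_branch; infer_instance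

-- ===== CLAIM (what is proved, stated in full; the proofs are below) =====
def Claim_equal_expand_branch : Prop := ∀ (grammar_hash : List (String × List (List String))) (branch_id : String), Dom_expand_branch grammar_hash branch_id → Pre_expand_branch grammar_hash branch_id → Spec_expand_branch grammar_hash branch_id (expand_branch grammar_hash branch_id)

-- ===== LEMMAS AND PROOFS =====

-- The enumerate-loop inside A's recursion, started at index i, equals the fold of
-- the modify-step over pvGoB's pairs for the same branches and index, assuming the
-- fuel-f correspondence for the recursive calls.
theorem pvGoB_fold (g : List (String × List (List String))) (f : Nat) (bid : String)
    (ih : ∀ (bid' : String) (trace : List String)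
        (paths : PySem.Dict String (List (List String))),
        pvRecA g f bid' trace paths
          = (pvLeavesB g f bid').foldl
              (fun p tt => p.modify tt.1 [] (· ++ [trace ++ tt.2])) paths) :
    ∀ (branches : List (List String)) (i : Int) (trace : List String)
      (paths : PySem.Dict String (List (List String))),
      (PySem.List.enumerate branches i).foldl
          (fun p ib =>
            pvRecA g f ((PySem.List.pyGet? ib.2 0).getD "") (trace ++ [pvLabel bid ib.1]) p)
          paths
        = (pvGoB (pvLeavesB g f) bid i branches).foldl
            (fun p tt => p.modify tt.1 [] (· ++ [trace ++ tt.2])) paths := by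
  intro branches
  induction branches with
  | nil => intro i trace paths; simp [PySem.List.enumerate_nil, pvGoB]
  | cons br rest ihb =>
    intro i trace paths
    rw [PySem.List.enumerate_cons, List.foldl_cons, ih]
    simp only [pvGoB, List.foldl_append, List.foldl_map]
    rw [ihb]
    congr 2
    funext p tt
    simp [List.append_assoc]

-- A's dict-mutating recursion with downward-threaded prefix `trace` equals the
-- append-into-dict fold over B's bottom-up leaf pairs, for EVERY fuel (both
-- sides contribute nothing on exhaustion, so no reachability argument is needed).
theorem pvRecA_eq_leavesB (g : List (String × List (List String))) :
    ∀ (f : Nat) (bid : String) (trace : List String)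
      (paths : PySem.Dict String (List (List String))),
      pvRecA g f bid trace paths
        = (pvLeavesB g f bid).foldl
            (fun p tt => p.modify tt.1 [] (· ++ [trace ++ tt.2])) paths := by
  intro f
  induction f with
  | zero => intro bid trace paths; simp [pvRecA, pvLeavesB]
  | succ f ih =>
    intro bid trace paths
    simp only [pvRecA, pvLeavesB]
    cases h : (PySem.Dict.mk g).get? bid with
    | none => simp
    | some branches => exact pvGoB_fold g f bid ih branches 0 trace paths

-- B's token-collecting loop IS ordered dedup of the first components.
theorem pvTokensB_eq_update (L : List (String × List String)) :
    ∀ acc, pvTokensB acc L = PySem.Set.update acc (L.map (·.1)) := by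
  induction L with
  | nil => intro acc; simp [pvTokensB, PySem.Set.update_nil]
  | cons tt rest ih =>
    intro acc
    rw [List.map_cons, PySem.Set.update_cons, pvTokensB, ih,
        PySem.Set.add_eq_ite]
    by_cases hm : tt.1 ∈ acc <;> simp [hm]

-- Grouping by a dict of appended values equals B's dedup-then-filter grouping.
theorem foldl_modify_items (L : List (String × List String)) :
    (L.foldl (fun d tt => d.modify tt.1 [] (· ++ [tt.2]))
        (PySem.Dict.empty : PySem.Dict String (List (List String)))).items
      = (pvTokensB [] L).map
          (fun tok => (tok, (L.filter (fun tt => tt.1 == tok)).map (·.2))) := by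
  rw [PySem.Dict.items_eq_map_keys _
        (PySem.Dict.nodup_keys_foldl_modify_key L (·.1) [] (fun d tt => (· ++ [tt.2]))
          PySem.Dict.empty (by simp)) []]
  rw [PySem.Dict.keys_foldl_modify_key, PySem.Dict.keys_empty,
      pvTokensB_eq_update L []]
  apply List.map_congr_left
  intro tok _
  rw [PySem.Dict.getD_foldl_modify_append, PySem.Dict.getD_empty, List.nil_append]

-- ===== VERDICT (by name: the statement is the Claim_ definition above) =====
theorem expand_branch_spec : Claim_equal_expand_branch := by
  intro grammar_hash branch_id _ _
  unfold Spec_expand_branch expand_branch expand_branch_alt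
  rw [pvRecA_eq_leavesB]
  simp only [List.nil_append]
  exact foldl_modify_items _
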